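-- pv_equiv track=rewrite | github.com/leetcode-completionist/leetcode | 2443_sum-of-number-and-its-reverse.py | sumOfNumberAndReverse
-- ===== SOURCE A (Python) =====
-- def sumOfNumberAndReverse(num: int) -> bool:
--     for i in range(num, num // 2 - 1, -1):
--         i_s = str(i)
--         i_s_n = len(i_s)
--
--         diff = num - i
--         diff_s = str(diff).zfill(i_s_n)
--
--         if i_s[::-1] == diff_s:
--             return True
--
--     return False
-- ===== SOURCE B (Python) =====
-- def sumOfNumberAndReverse(num: int) -> bool:
--     if num < 0:
--         return False
--     for i in range(num // 2, num + 1):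
--         r, t = 0, i
--         while t > 0:
--             r = r * 10 + t % 10
--             t //= 10
--         if i + r == num:
--             return True
--     return False
-- ===== Notes on version B (the rewrite author's own statement) =====
-- stated objective: alternative
-- what changed: B scans the candidates upward and tests each with a purely arithmetic digit-reversal loop (r = r*10 + t%10), replacing A's downward scan that builds, reverses and zero-pads decimal strings for every candidate.
import Mathlib
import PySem

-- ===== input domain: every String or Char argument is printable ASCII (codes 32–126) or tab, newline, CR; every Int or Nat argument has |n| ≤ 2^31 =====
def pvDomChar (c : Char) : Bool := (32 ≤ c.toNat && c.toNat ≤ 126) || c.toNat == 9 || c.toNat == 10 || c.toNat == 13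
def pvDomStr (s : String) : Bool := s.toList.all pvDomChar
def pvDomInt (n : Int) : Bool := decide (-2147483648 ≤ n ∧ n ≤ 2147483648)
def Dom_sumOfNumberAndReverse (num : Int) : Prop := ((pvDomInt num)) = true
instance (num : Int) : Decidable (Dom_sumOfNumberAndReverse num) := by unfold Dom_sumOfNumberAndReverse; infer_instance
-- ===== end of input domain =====

-- B replaces A's string-reversal/zfill comparison by a purely arithmetic digit-reversal loop
-- scanned upward (objective: alternative; same O(num) scan, no string building).

-- ===== PORT A =====
-- str/len/zfill ported on the code-point list via PySem.Int.toChars / PySem.Chars.zfill;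
-- i_s[::-1] is string reversal, ported as List.reverse (exact).
def sumOfNumberAndReverse (num : Int) : Bool :=
  (PySem.List.pyRange num (PySem.Int.floordiv num 2 - 1) (-1)).any (fun i =>
    let i_s : List Char := PySem.Int.toChars i
    let i_s_n : Nat := i_s.length
    let diff : Int := num - i
    let diff_s : List Char := PySem.Chars.zfill (PySem.Int.toChars diff) (i_s_n : Int)
    i_s.reverse == diff_s)

-- ===== PORT B =====
-- the `while t > 0: r = r*10 + t%10; t //= 10` loop of Source B, on the (r, t) state
def pvRevLoop (r t : Int) : Int :=
  if 0 < t then pvRevLoop (r * 10 + PySem.Int.mod t 10) (PySem.Int.floordiv t 10) else r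
termination_by t.toNat
decreasing_by
  have h10 : PySem.Int.floordiv t 10 = t / 10 := PySem.Int.floordiv_eq_ediv_of_pos (by norm_num)
  rw [h10]; omega

def sumOfNumberAndReverse_alt (num : Int) : Bool :=
  if num < 0 then false
  else (PySem.List.pyRange (PySem.Int.floordiv num 2) (num + 1) 1).any (fun i =>
    i + pvRevLoop 0 i == num)

-- ===== PRECONDITION & SPEC =====
def Spec_sumOfNumberAndReverse (num : Int) (out : Bool) : Prop := out = sumOfNumberAndReverse_alt num
instance (num : Int) (out : Bool) : Decidable (Spec_sumOfNumberAndReverse num out) := by unfold Spec_sumOfNumberAndReverse; infer_instance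

-- ===== CLAIM (what is proved, stated in full; the proofs are below) =====
def Claim_equal_sumOfNumberAndReverse : Prop := ∀ (num : Int), Dom_sumOfNumberAndReverse num → Spec_sumOfNumberAndReverse num (sumOfNumberAndReverse num)

-- ===== LEMMAS AND PROOFS =====

-- decimal digit list of i as printed by str(i) for i ≥ 0: little-endian, ['0'] special-cased
def pvD (i : Nat) : List Nat := if i = 0 then [0] else Nat.digits 10 i

lemma pvD_ne_nil (i : Nat) : pvD i ≠ [] := by
  unfold pvD; split
  · simp
  · exact Nat.digits_ne_nil_iff_ne_zero.mpr (by assumption)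

lemma pvD_lt (i : Nat) : ∀ a ∈ pvD i, a < 10 := by
  unfold pvD; split
  · simp
  · intro a ha; exact Nat.digits_lt_base (by norm_num) ha

lemma pvOfDigits_pvD (d : Nat) : Nat.ofDigits 10 (pvD d) = d := by
  unfold pvD; split
  · simp [Nat.ofDigits]; omega
  · exact Nat.ofDigits_digits 10 d

lemma pvOfDigits_replicate_zero (k : Nat) : Nat.ofDigits 10 (List.replicate k 0) = 0 := by
  induction k with
  | zero => simp
  | succ k ih => simp [List.replicate_succ, Nat.ofDigits_cons, ih]

lemma pvOfDigits_pvD_reverse (i : Nat) :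
    Nat.ofDigits 10 ((pvD i).reverse) = Nat.ofDigits 10 ((Nat.digits 10 i).reverse) := by
  unfold pvD; split
  · subst ‹i = 0›; simp
  · rfl

lemma pvDigitChar_not_sign (x : Nat) : Nat.digitChar x ≠ '+' ∧ Nat.digitChar x ≠ '-' := by
  rcases Nat.lt_or_ge x 16 with h | h
  · interval_cases x <;> decide
  · have hstar : Nat.digitChar x = '*' := by
      unfold Nat.digitChar
      repeat rw [if_neg (by omega)]
    rw [hstar]; decide

lemma pvDigitChar_inj10 : ∀ a, a < 10 → ∀ b, b < 10 → Nat.digitChar a = Nat.digitChar b → a = b := by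
  decide

lemma pvMap_inj : ∀ (as bs : List Nat), (∀ a ∈ as, a < 10) → (∀ b ∈ bs, b < 10) →
    (as.map Nat.digitChar = bs.map Nat.digitChar ↔ as = bs) := by
  intro as
  induction as with
  | nil => intro bs _ _; cases bs <;> simp
  | cons a as ih =>
    intro bs ha hb
    cases bs with
    | nil => simp
    | cons b bs =>
      simp only [List.map_cons, List.cons.injEq]
      constructor
      · rintro ⟨h1, h2⟩
        have hab := pvDigitChar_inj10 a (ha a (by simp)) b (hb b (by simp)) h1
        exact ⟨hab, (ih bs (fun x hx => ha x (by simp [hx])) (fun x hx => hb x (by simp [hx]))).mp h2⟩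
      · rintro ⟨rfl, rfl⟩; exact ⟨rfl, rfl⟩

lemma pvOfDigits_inj : ∀ (as bs : List Nat), (∀ a ∈ as, a < 10) → (∀ b ∈ bs, b < 10) →
    as.length = bs.length → Nat.ofDigits 10 as = Nat.ofDigits 10 bs → as = bs := by
  intro as
  induction as with
  | nil => intro bs _ _ hlen _; cases bs <;> simp_all
  | cons a as ih =>
    intro bs ha hb hlen hval
    cases bs with
    | nil => simp_all
    | cons b bs =>
      rw [Nat.ofDigits_cons, Nat.ofDigits_cons] at hval
      have ha0 : a < 10 := ha a (by simp)
      have hb0 : b < 10 := hb b (by simp)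
      have hab : a = b := by omega
      have hrest : Nat.ofDigits 10 as = Nat.ofDigits 10 bs := by omega
      have := ih bs (fun x hx => ha x (by simp [hx])) (fun x hx => hb x (by simp [hx]))
        (by simpa using hlen) hrest
      simp [hab, this]

lemma pvToDigitsCore_eq (f : Nat) : ∀ (n : Nat) (acc : List Char), 0 < n → n < 10 ^ f →
    Nat.toDigitsCore 10 f n acc = ((Nat.digits 10 n).map Nat.digitChar).reverse ++ acc := by
  induction f with
  | zero => intro n acc h1 h2; simp at h2; omega
  | succ f ih =>
    intro n acc h1 h2
    simp only [Nat.toDigitsCore]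
    by_cases h : n / 10 = 0
    · rw [if_pos h, Nat.digits_def' (by norm_num : (1:Nat) < 10) h1, h]
      simp
    · rw [if_neg h, ih (n / 10) _ (Nat.pos_of_ne_zero h)
        (by rw [Nat.div_lt_iff_lt_mul (by norm_num)]; rw [pow_succ] at h2; omega)]
      rw [Nat.digits_def' (by norm_num : (1:Nat) < 10) h1]
      simp

lemma pvToDigits_eq (i : Nat) : Nat.toDigits 10 i = ((pvD i).map Nat.digitChar).reverse := by
  by_cases h : i = 0
  · subst h; decide
  · unfold Nat.toDigits pvD
    rw [if_neg h, pvToDigitsCore_eq (i + 1) i [] (Nat.pos_of_ne_zero h)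
      (lt_of_lt_of_le (Nat.lt_pow_self (by norm_num)) (Nat.pow_le_pow_right (by norm_num) (by omega)))]
    simp

lemma pvToChars_nat (k : Nat) : PySem.Int.toChars (k : Int) = Nat.toDigits 10 k := by
  simp [PySem.Int.toChars]

lemma pvRevLoop_spec : ∀ (t : Nat) (r : Int), pvRevLoop r (t : Int) =
    r * 10 ^ (Nat.digits 10 t).length + (Nat.ofDigits 10 ((Nat.digits 10 t).reverse) : Nat) := by
  intro t
  induction t using Nat.strong_induction_on with
  | _ t ih =>
    intro r
    rw [pvRevLoop]
    by_cases ht : 0 < (t : Int)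
    · rw [if_pos ht]
      have ht' : 0 < t := by exact_mod_cast ht
      have hm : PySem.Int.mod (t : Int) 10 = ((t % 10 : Nat) : Int) := by
        exact_mod_cast PySem.Int.mod_natCast t 10
      have hd : PySem.Int.floordiv (t : Int) 10 = ((t / 10 : Nat) : Int) := by
        exact_mod_cast PySem.Int.floordiv_natCast t 10
      rw [hm, hd, ih (t / 10) (Nat.div_lt_self ht' (by norm_num))]
      rw [Nat.digits_def' (by norm_num : (1:Nat) < 10) ht']
      simp only [List.reverse_cons, Nat.ofDigits_append, List.length_reverse, List.length_cons,
        Nat.ofDigits_cons, Nat.ofDigits_nil]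
      push_cast
      ring
    · rw [if_neg ht]
      have : t = 0 := by omega
      subst this
      simp [Nat.ofDigits_nil]

lemma pvRev0 (i : Nat) :
    pvRevLoop 0 (i : Int) = (Nat.ofDigits 10 ((Nat.digits 10 i).reverse) : Nat) := by
  rw [pvRevLoop_spec i 0]; ring

lemma pvZfill_eq (d n : Nat) :
    PySem.Chars.zfill (((pvD d).map Nat.digitChar).reverse) (n : Int) =
      (List.replicate (n - (pvD d).length) 0 ++ (pvD d).reverse).map Nat.digitChar := by
  have hlen : (((pvD d).map Nat.digitChar).reverse).length = (pvD d).length := by simp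
  by_cases h : (n : Int) ≤ (((pvD d).map Nat.digitChar).reverse).length
  · have hnm : n - (pvD d).length = 0 := by rw [hlen] at h; omega
    rw [hnm]
    simp only [PySem.Chars.zfill]
    rw [if_pos h]
    simp [List.map_reverse]
  · rcases hcs : ((pvD d).map Nat.digitChar).reverse with _ | ⟨c, rest⟩
    · exfalso
      have := pvD_ne_nil d
      simp at hcs
      exact this hcs
    · have hc : ∃ x, Nat.digitChar x = c := by
        have hmem : c ∈ ((pvD d).map Nat.digitChar).reverse := by rw [hcs]; simp
        rw [List.mem_reverse, List.mem_map] at hmem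
        obtain ⟨x, _, hx⟩ := hmem
        exact ⟨x, hx⟩
      obtain ⟨x, hx⟩ := hc
      have hns : ¬ (c = '+' ∨ c = '-') := by
        rw [← hx]
        have := pvDigitChar_not_sign x
        tauto
      rw [← hcs]
      simp only [PySem.Chars.zfill, if_neg h]
      rw [hcs]
      simp only [if_neg hns]
      rw [← hcs]
      have : (n : Int).toNat - (((pvD d).map Nat.digitChar).reverse).length
          = n - (pvD d).length := by rw [hlen]; omega
      rw [this]
      have hrep : List.replicate (n - (pvD d).length) '0'
          = (List.replicate (n - (pvD d).length) 0).map Nat.digitChar := by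
        rw [List.map_replicate]
        simp [Nat.digitChar]
      rw [hrep]
      simp [List.map_append, List.map_reverse]

lemma pvStr_iff (i d : Nat) :
    ((pvD i).map Nat.digitChar
        = PySem.Chars.zfill (((pvD d).map Nat.digitChar).reverse) (((pvD i).length : Nat) : Int))
      ↔ (Nat.ofDigits 10 ((Nat.digits 10 i).reverse) : Nat) = d := by
  rw [pvZfill_eq d (pvD i).length]
  rw [pvMap_inj _ _ (pvD_lt i) (by
    intro b hb
    rcases List.mem_append.mp hb with h | h
    · have := List.eq_of_mem_replicate h; omega
    · exact pvD_lt d b (List.mem_reverse.mp h))]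
  have hrevval : Nat.ofDigits 10 ((pvD i).reverse) = Nat.ofDigits 10 ((Nat.digits 10 i).reverse) :=
    pvOfDigits_pvD_reverse i
  constructor
  · intro h
    have h' : (pvD i).reverse = pvD d ++ List.replicate ((pvD i).length - (pvD d).length) 0 := by
      rw [h]; simp [List.reverse_append, List.reverse_replicate]
    have hv := congrArg (Nat.ofDigits 10) h'
    rw [hrevval, Nat.ofDigits_append, pvOfDigits_pvD, pvOfDigits_replicate_zero] at hv
    omega
  · intro h
    have hdlt : d < 10 ^ (pvD i).length := by
      rw [← h]
      calc Nat.ofDigits 10 ((Nat.digits 10 i).reverse)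
          < 10 ^ ((Nat.digits 10 i).reverse).length :=
            Nat.ofDigits_lt_base_pow_length (by norm_num)
              (fun x hx => Nat.digits_lt_base (by norm_num) (List.mem_reverse.mp hx))
        _ ≤ 10 ^ (pvD i).length := by
            apply Nat.pow_le_pow_right (by norm_num)
            unfold pvD
            split
            · rename_i h0; subst h0; simp
            · simp
    have hmn : (pvD d).length ≤ (pvD i).length := by
      have hpos : 0 < (pvD i).length := List.length_pos_iff.mpr (pvD_ne_nil i)
      by_cases hd0 : d = 0
      · subst hd0
        have h1 : (pvD 0).length = 1 := by simp [pvD]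
        omega
      · have hdl : (Nat.digits 10 d).length ≤ (pvD i).length :=
          (Nat.digits_length_le_iff (by norm_num) d).mpr hdlt
        simpa [pvD, hd0] using hdl
    have heq := pvOfDigits_inj ((pvD i).reverse)
      (pvD d ++ List.replicate ((pvD i).length - (pvD d).length) 0)
      (fun x hx => pvD_lt i x (List.mem_reverse.mp hx))
      (by
        intro b hb
        rcases List.mem_append.mp hb with h' | h'
        · exact pvD_lt d b h'
        · have := List.eq_of_mem_replicate h'; omega)
      (by simp; omega)
      (by rw [hrevval, h, Nat.ofDigits_append, pvOfDigits_pvD, pvOfDigits_replicate_zero]; ring)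
    have := congrArg List.reverse heq
    rw [List.reverse_reverse] at this
    rw [this]
    simp [List.reverse_append, List.reverse_replicate]
  
lemma pvCheck_eq (i d : Nat) :
    ((Nat.toDigits 10 i).reverse
        == PySem.Chars.zfill (Nat.toDigits 10 d) (((Nat.toDigits 10 i).length : Nat) : Int))
      = (pvRevLoop 0 (i : Int) == (d : Int)) := by
  rw [Bool.eq_iff_iff]
  simp only [beq_iff_eq]
  rw [pvToDigits_eq i, pvToDigits_eq d, pvRev0, List.reverse_reverse]
  have hlen : (((pvD i).map Nat.digitChar).reverse).length = (pvD i).length := by simp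
  rw [hlen, pvStr_iff i d]
  constructor
  · intro h; exact_mod_cast h
  · intro h; exact_mod_cast h

theorem pv_main (num : Int) : sumOfNumberAndReverse num = sumOfNumberAndReverse_alt num := by
  by_cases hneg : num < 0
  · by_cases h2 : num ≤ -2
    · have hfd : num + 1 ≤ PySem.Int.floordiv num 2 :=
        (PySem.Int.le_floordiv_iff_mul_le (by norm_num)).mpr (by omega)
      unfold sumOfNumberAndReverse sumOfNumberAndReverse_alt
      rw [PySem.List.pyRange_neg_one_eq_nil (by omega), if_pos hneg]
      simp
    · have : num = -1 := by omega
      subst this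
      decide
  · rw [not_lt] at hneg
    have hfd0 : 0 ≤ PySem.Int.floordiv num 2 :=
      (PySem.Int.le_floordiv_iff_mul_le (by norm_num)).mpr (by omega)
    unfold sumOfNumberAndReverse sumOfNumberAndReverse_alt
    rw [if_neg (by omega)]
    rw [PySem.List.pyRange_neg_one_eq_reverse]
    have harg : PySem.Int.floordiv num 2 - 1 + 1 = PySem.Int.floordiv num 2 := by ring
    rw [harg, List.any_reverse]
    apply PySem.List.any_congr_mem
    intro i hi
    rw [PySem.List.mem_pyRange_one] at hi
    obtain ⟨h1, h2⟩ := hi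
    have hi0 : 0 ≤ i := le_trans hfd0 h1
    obtain ⟨iN, rfl⟩ : ∃ k : Nat, i = (k : Int) := ⟨i.toNat, (Int.toNat_of_nonneg hi0).symm⟩
    have hd0 : 0 ≤ num - (iN : Int) := by omega
    obtain ⟨dN, hdN⟩ : ∃ k : Nat, num - (iN : Int) = (k : Int) :=
      ⟨(num - (iN : Int)).toNat, (Int.toNat_of_nonneg hd0).symm⟩
    simp only
    rw [hdN, pvToChars_nat, pvToChars_nat, pvCheck_eq]
    rw [Bool.eq_iff_iff]
    simp only [beq_iff_eq]
    omega

-- ===== VERDICT (by name: the statement is the Claim_ definition above) =====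
theorem sumOfNumberAndReverse_spec : Claim_equal_sumOfNumberAndReverse := by
  intro num _
  unfold Spec_sumOfNumberAndReverse
  exact pv_main num
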